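-- pv_equiv track=rewrite | github.com/gabrielmachado395/Ficha-de-Artigo | print/print_cli.py | _normalize_printer_name
-- ===== SOURCE A (Python) =====
-- def _normalize_printer_name(name: str) -> str:
--     # Ajuda a casar nomes como "ELGIN i8" vs "ELGIN i8 (copy 1)".
--     s = str(name or "").strip().lower()
--     if not s:
--         return ""
--     for suffix in (" (copy 1)", " (copy 2)", " (copy 3)", " (copy 4)", " (copy 5)"):
--         if s.endswith(suffix):
--             s = s[: -len(suffix)].strip()
--             break
--     return s
-- ===== SOURCE B (Python) =====
-- def _normalize_printer_name(name: str) -> str: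
--     # Positional pattern check on the tail instead of trying five literal suffixes.
--     s = str(name or "").strip().lower()
--     if not s:
--         return ""
--     if s[-9:-2] == " (copy " and s[-2] in "12345" and s[-1] == ")":
--         return s[:-9].strip()
--     return s
-- ===== Notes on version B (the rewrite author's own statement) =====
-- stated objective: alternative
-- what changed: A loops over the five literal copy-number suffixes calling endswith on each; B instead makes one positional check of the tail (a seven-character slice, the digit position and the closing parenthesis) and strips the last nine characters once when it matches.
import Mathlib
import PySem

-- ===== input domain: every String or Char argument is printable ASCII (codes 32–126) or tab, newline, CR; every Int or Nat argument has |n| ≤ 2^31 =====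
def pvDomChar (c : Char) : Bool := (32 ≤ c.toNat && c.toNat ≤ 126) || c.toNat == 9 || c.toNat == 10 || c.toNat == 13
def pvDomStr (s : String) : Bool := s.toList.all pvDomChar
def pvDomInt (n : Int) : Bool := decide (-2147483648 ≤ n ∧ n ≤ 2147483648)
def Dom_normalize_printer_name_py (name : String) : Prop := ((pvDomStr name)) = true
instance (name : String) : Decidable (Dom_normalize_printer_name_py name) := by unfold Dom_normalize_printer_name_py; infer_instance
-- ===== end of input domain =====

-- B replaces A's loop over five literal " (copy N)" suffixes by one positional pattern check on the tail (slice/index tests); same result, alternative decomposition.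

-- ===== PORT A =====
def pvSuffixesA : List (List Char) :=
  [" (copy 1)".toList, " (copy 2)".toList, " (copy 3)".toList, " (copy 4)".toList, " (copy 5)".toList]

-- the 'for suffix in (…): if s.endswith(suffix): s = s[:-len(suffix)].strip(); break'
def pvLoopA (s : List Char) : List (List Char) → List Char
  | [] => s
  | suf :: rest =>
    if PySem.Chars.endswith s suf then
      PySem.Chars.strip (PySem.List.slice s none (some (-(PySem.List.len suf))))
    else pvLoopA s rest

def normalize_printer_name_py (name : String) : String :=
  let s := PySem.Chars.lower (PySem.Chars.strip name.toList)
  if s = [] then "" else String.ofList (pvLoopA s pvSuffixesA)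

-- ===== PORT B =====
def normalize_printer_name_py_alt (name : String) : String :=
  let s := PySem.Chars.lower (PySem.Chars.strip name.toList)
  if s = [] then ""
  else if (PySem.List.slice s (some (-9)) (some (-2)) == " (copy ".toList)
       && PySem.Chars.isIn [PySem.List.pyGetD s (-2) ' '] "12345".toList
       && (PySem.List.pyGetD s (-1) ' ' == ')') then
    String.ofList (PySem.Chars.strip (PySem.List.slice s none (some (-9))))
  else String.ofList s

-- ===== PRECONDITION & SPEC =====
def Spec_normalize_printer_name_py (name : String) (out : String) : Prop := out = normalize_printer_name_py_alt name
instance (name : String) (out : String) : Decidable (Spec_normalize_printer_name_py name out) := by unfold Spec_normalize_printer_name_py; infer_instance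

-- ===== CLAIM (what is proved, stated in full; the proofs are below) =====
def Claim_equal_normalize_printer_name_py : Prop := ∀ (name : String), Dom_normalize_printer_name_py name → Spec_normalize_printer_name_py name (normalize_printer_name_py name)

-- ===== LEMMAS AND PROOFS =====

-- a suffix of t ++ L of the same length as L is L itself
lemma pv_suffix_append_iff (t L suf : List Char) (h : suf.length = L.length) :
    suf <:+ t ++ L ↔ suf = L := by
  constructor
  · rintro ⟨p, hp⟩
    have hlen := congrArg List.length hp
    simp only [List.length_append] at hlen
    exact (List.append_inj hp (by omega)).2
  · rintro rfl; exact List.suffix_append _ _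

lemma pv_endswith_append_eq (t L suf : List Char) (h : suf.length = L.length) :
    PySem.Chars.endswith (t ++ L) suf = decide (suf = L) := by
  by_cases h' : suf = L
  · simp only [h', decide_true]
    rw [PySem.Chars.endswith_iff]
    exact List.suffix_append _ _
  · simp only [h', decide_false]
    rw [← Bool.not_eq_true, PySem.Chars.endswith_iff]
    intro hs
    exact h' ((pv_suffix_append_iff t L suf h).mp hs)

-- A's loop finds no suffix and B's guard fails when s is shorter than 9
lemma pv_short (s : List Char) (hs : s.length < 9) :
    pvLoopA s pvSuffixesA = s ∧
      ((PySem.List.slice s (some (-9)) (some (-2)) == " (copy ".toList)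
        && PySem.Chars.isIn [PySem.List.pyGetD s (-2) ' '] "12345".toList
        && (PySem.List.pyGetD s (-1) ' ' == ')')) = false := by
  have hend : ∀ suf : List Char, suf.length = 9 → PySem.Chars.endswith s suf = false := by
    intro suf h9
    rw [← Bool.not_eq_true, PySem.Chars.endswith_iff]
    intro hsf
    have := hsf.length_le
    omega
  constructor
  · simp only [pvSuffixesA, pvLoopA]
    rw [hend _ (by decide), hend _ (by decide), hend _ (by decide), hend _ (by decide),
        hend _ (by decide)]
    simp
  · have hlen : (PySem.List.slice s (some (-9)) (some (-2))).length < 7 := by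
      simp only [PySem.List.slice, PySem.List.clampIdx_neg_ofNat _ 2 (by omega),
        PySem.List.clampIdx_neg_ofNat _ 9 (by omega), List.length_take, List.length_drop]
      omega
    have hne : (PySem.List.slice s (some (-9)) (some (-2)) == " (copy ".toList) = false := by
      rw [beq_eq_false_iff_ne]
      intro heq
      have := congrArg List.length heq
      simp at this
      omega
    rw [hne]
    rfl

-- a one-character needle is found iff the character occurs
lemma pv_isIn_singleton (a : Char) (l : List Char) :
    PySem.Chars.isIn [a] l = decide (a ∈ l) := by
  by_cases h : a ∈ l
  · simp only [h, decide_true]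
    rw [PySem.Chars.isIn_iff_infix]
    exact (List.singleton_infix_iff a l).mpr h
  · simp only [h, decide_false]
    rw [← Bool.not_eq_true, PySem.Chars.isIn_iff_infix]
    intro hs
    exact h ((List.singleton_infix_iff a l).mp hs)

-- A's loop on a string with at least 9 characters: strip t iff the last 9 are a listed suffix
lemma pvLoopA_char (t L : List Char) (hL : L.length = 9) :
    pvLoopA (t ++ L) pvSuffixesA = if L ∈ pvSuffixesA then PySem.Chars.strip t else t ++ L := by
  have htake : PySem.List.slice (t ++ L) none (some (-9)) = t := by
    rw [PySem.List.slice_to_neg_ofNat _ 9 (by omega)]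
    simp [hL]
  simp only [pvSuffixesA, pvLoopA,
    pv_endswith_append_eq t L _ (by simp [hL] : (" (copy 1)".toList).length = L.length),
    pv_endswith_append_eq t L _ (by simp [hL] : (" (copy 2)".toList).length = L.length),
    pv_endswith_append_eq t L _ (by simp [hL] : (" (copy 3)".toList).length = L.length),
    pv_endswith_append_eq t L _ (by simp [hL] : (" (copy 4)".toList).length = L.length),
    pv_endswith_append_eq t L _ (by simp [hL] : (" (copy 5)".toList).length = L.length)]
  simp only [show (-PySem.List.len " (copy 1)".toList : Int) = -9 from rfl,
    show (-PySem.List.len " (copy 2)".toList : Int) = -9 from rfl,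
    show (-PySem.List.len " (copy 3)".toList : Int) = -9 from rfl,
    show (-PySem.List.len " (copy 4)".toList : Int) = -9 from rfl,
    show (-PySem.List.len " (copy 5)".toList : Int) = -9 from rfl, htake,
    decide_eq_true_eq, List.mem_cons, List.not_mem_nil, or_false]
  split_ifs <;>
    first
      | rfl
      | (rename_i hmem; exfalso; rcases hmem with rfl | rfl | rfl | rfl | rfl <;> simp_all)
      | simp_all

-- B's guard on a string with at least 9 characters tests membership of the last 9 in the list
lemma pv_guard (t : List Char) (c1 c2 c3 c4 c5 c6 c7 c8 c9 : Char) :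
    ((PySem.List.slice (t ++ [c1,c2,c3,c4,c5,c6,c7,c8,c9]) (some (-9)) (some (-2)) == " (copy ".toList)
      && PySem.Chars.isIn [PySem.List.pyGetD (t ++ [c1,c2,c3,c4,c5,c6,c7,c8,c9]) (-2) ' '] "12345".toList
      && (PySem.List.pyGetD (t ++ [c1,c2,c3,c4,c5,c6,c7,c8,c9]) (-1) ' ' == ')')) =
    decide ([c1,c2,c3,c4,c5,c6,c7,c8,c9] ∈ pvSuffixesA) := by
  have es : PySem.List.slice (t ++ [c1,c2,c3,c4,c5,c6,c7,c8,c9]) (some (-9)) (some (-2))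
      = [c1,c2,c3,c4,c5,c6,c7] := by simp [PySem.List.slice]
  have e2 : PySem.List.pyGetD (t ++ [c1,c2,c3,c4,c5,c6,c7,c8,c9]) (-2) ' ' = c8 := by
    rw [PySem.List.pyGetD_neg_ofNat _ 2 ' ' (by omega) (by simp)]
    simp [List.getElem_append_right]
  have e1 : PySem.List.pyGetD (t ++ [c1,c2,c3,c4,c5,c6,c7,c8,c9]) (-1) ' ' = c9 := by
    rw [PySem.List.pyGetD_neg_ofNat _ 1 ' ' (by omega) (by simp)]
    simp [List.getElem_append_right]
  rw [es, e2, e1, pv_isIn_singleton]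
  simp only [pvSuffixesA, Bool.and_eq_decide, beq_iff_eq, decide_eq_decide,
    decide_eq_true_eq, List.mem_cons, List.not_mem_nil, or_false,
    show (" (copy ".toList : List Char) = [' ','(','c','o','p','y',' '] from rfl,
    show ("12345".toList : List Char) = ['1','2','3','4','5'] from rfl,
    show (" (copy 1)".toList : List Char) = [' ','(','c','o','p','y',' ','1',')'] from rfl,
    show (" (copy 2)".toList : List Char) = [' ','(','c','o','p','y',' ','2',')'] from rfl,
    show (" (copy 3)".toList : List Char) = [' ','(','c','o','p','y',' ','3',')'] from rfl,
    show (" (copy 4)".toList : List Char) = [' ','(','c','o','p','y',' ','4',')'] from rfl,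
    show (" (copy 5)".toList : List Char) = [' ','(','c','o','p','y',' ','5',')'] from rfl,
    List.cons.injEq, and_true]
  tauto

-- the two bodies agree on every s
lemma pv_body (s : List Char) :
    String.ofList (pvLoopA s pvSuffixesA) =
      (if ((PySem.List.slice s (some (-9)) (some (-2)) == " (copy ".toList)
          && PySem.Chars.isIn [PySem.List.pyGetD s (-2) ' '] "12345".toList
          && (PySem.List.pyGetD s (-1) ' ' == ')')) then
        String.ofList (PySem.Chars.strip (PySem.List.slice s none (some (-9))))
      else String.ofList s) := by
  by_cases hs : s.length < 9
  · obtain ⟨h1, h2⟩ := pv_short s hs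
    rw [h1, h2]
    simp
  · have hdec : ∃ (t : List Char) (c1 c2 c3 c4 c5 c6 c7 c8 c9 : Char),
        s = t ++ [c1,c2,c3,c4,c5,c6,c7,c8,c9] := by
      have hL : (s.drop (s.length - 9)).length = 9 := by
        rw [List.length_drop]; omega
      have hsplit : s.take (s.length - 9) ++ s.drop (s.length - 9) = s := s.take_append_drop _
      generalize hg : s.drop (s.length - 9) = L at hL hsplit
      match L, hL with
      | [c1,c2,c3,c4,c5,c6,c7,c8,c9], _ =>
        exact ⟨s.take (s.length - 9), c1, c2, c3, c4, c5, c6, c7, c8, c9, hsplit.symm⟩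
    obtain ⟨t, c1, c2, c3, c4, c5, c6, c7, c8, c9, rfl⟩ := hdec
    have htake : PySem.List.slice (t ++ [c1,c2,c3,c4,c5,c6,c7,c8,c9]) none (some (-9)) = t := by
      rw [PySem.List.slice_to_neg_ofNat _ 9 (by omega)]
      simp
    rw [pvLoopA_char t _ (by simp), pv_guard, htake]
    by_cases hm : [c1,c2,c3,c4,c5,c6,c7,c8,c9] ∈ pvSuffixesA <;> simp [hm]

-- ===== VERDICT (by name: the statement is the Claim_ definition above) =====
theorem normalize_printer_name_py_spec : Claim_equal_normalize_printer_name_py := by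
  intro name _
  unfold Spec_normalize_printer_name_py normalize_printer_name_py normalize_printer_name_py_alt
  by_cases h : PySem.Chars.lower (PySem.Chars.strip name.toList) = []
  · simp [h]
  · simp only [h, if_false]
    exact pv_body _
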